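-- pv_equiv track=rewrite | github.com/jzyfox/cog-RMBG | asset_catalog_grid.py | parse_catalog_category_from_stem
-- ===== SOURCE A (Python) =====
-- CATEGORY_ALIASES: dict[str, tuple[str, ...]] = {
--     "sofa": ("sofa", "couch"),
--     "coffee_table": ("coffee_table", "tea_table"),
--     "lounge_chair": ("lounge_chair", "armchair", "accent_chair"),
--     "dining_table": ("dining_table", "table"),
--     "dining_chair": ("dining_chair", "chair"),
--     "bed": ("bed", "bedframe"),
--     "cabinet": ("cabinet", "bedside_table", "side_table", "nightstand", "night_table"),
-- }
--
-- KNOWN_CATEGORY_SUFFIXES: tuple[str, ...] = tuple(sorted({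
--     value
--     for canonical, aliases in CATEGORY_ALIASES.items()
--     for value in (canonical, *aliases)
-- }, key=len, reverse=True))
--
-- def normalize_catalog_type(type_name: str) -> str:
--     normalized = str(type_name or "").strip().lower()
--     if not normalized:
--         return "default"
--     for canonical, aliases in CATEGORY_ALIASES.items():
--         if normalized == canonical or normalized in aliases:
--             return canonical
--     return normalized
--
-- def parse_catalog_category_from_stem(stem: str) -> str:
--     normalized_stem = str(stem or "").strip().lower()
--     if not normalized_stem:
--         return "default"
--
--     for suffix in KNOWN_CATEGORY_SUFFIXES:
--         if normalized_stem == suffix or normalized_stem.endswith(f"_{suffix}"):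
--             return normalize_catalog_type(suffix)
--
--     if "_" not in normalized_stem:
--         return "default"
--     return normalize_catalog_type(normalized_stem.rsplit("_", 1)[-1])
-- ===== SOURCE B (Python) =====
-- CATEGORY_ALIASES: dict[str, tuple[str, ...]] = {
--     "sofa": ("sofa", "couch"),
--     "coffee_table": ("coffee_table", "tea_table"),
--     "lounge_chair": ("lounge_chair", "armchair", "accent_chair"),
--     "dining_table": ("dining_table", "table"),
--     "dining_chair": ("dining_chair", "chair"),
--     "bed": ("bed", "bedframe"),
--     "cabinet": ("cabinet", "bedside_table", "side_table", "nightstand", "night_table"),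
-- }
--
-- # one dict alias -> canonical category, built once (aliases are globally distinct)
-- _CANONICAL_BY_ALIAS: dict[str, str] = {
--     alias: canonical
--     for canonical, aliases in CATEGORY_ALIASES.items()
--     for alias in (canonical, *aliases)
-- }
--
-- def parse_catalog_category_from_stem(stem: str) -> str:
--     # One pass over the normalized stem: look up the whole stem, then the tail
--     # after each '_' (tails shrink, so the first dict hit is the longest match,
--     # and its value is already the canonical category). The fallback token (the
--     # part after the last '_') is collected during the same pass.
--     n = str(stem or "").strip().lower()
--     if not n:
--         return "default"
--     hit = _CANONICAL_BY_ALIAS.get(n)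
--     if hit is not None:
--         return hit
--     has_underscore = False
--     last = n
--     for j, ch in enumerate(n):
--         if ch == "_":
--             tail = n[j + 1:]
--             hit = _CANONICAL_BY_ALIAS.get(tail)
--             if hit is not None:
--                 return hit
--             has_underscore = True
--             last = tail
--     if not has_underscore:
--         return "default"
--     last = last.strip()
--     if not last:
--         return "default"
--     return _CANONICAL_BY_ALIAS.get(last, last)
-- ===== Notes on version B (the rewrite author's own statement) =====
-- stated objective: alternative
-- what changed: Instead of scanning the length-sorted suffix list with endswith tests and then re-normalizing the hit through the alias table, B builds one alias->canonical dict and makes a single left-to-right pass over the normalized stem, looking up the whole stem and the tail after each underscore directly in the dict (tails shrink, so the first hit is the longest match and its value is already the canonical category); the rsplit fallback token is collected during the same pass.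
import Mathlib
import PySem

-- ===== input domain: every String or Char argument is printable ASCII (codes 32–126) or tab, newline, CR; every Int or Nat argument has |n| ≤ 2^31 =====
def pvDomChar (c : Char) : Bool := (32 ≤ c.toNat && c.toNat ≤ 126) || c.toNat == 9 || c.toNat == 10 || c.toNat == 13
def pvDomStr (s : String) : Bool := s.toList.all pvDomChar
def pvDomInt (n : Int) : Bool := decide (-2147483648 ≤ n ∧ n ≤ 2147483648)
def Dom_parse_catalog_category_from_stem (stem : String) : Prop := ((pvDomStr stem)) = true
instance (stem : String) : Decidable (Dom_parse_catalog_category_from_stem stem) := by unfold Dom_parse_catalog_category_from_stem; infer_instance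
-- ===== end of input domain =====

-- B replaces A's scan of the length-sorted suffix list (endswith tests + alias re-normalization)
-- by one alias->canonical dict and a single left-to-right pass over the normalized stem that looks
-- up each token-boundary tail; alternative decomposition, same return value on every input.


-- ===== PORT A =====
-- module constant CATEGORY_ALIASES (dict iteration order = insertion order)
def pvAliases : List (List Char × List (List Char)) :=
  [ ("sofa".toList, ["sofa".toList, "couch".toList]),
    ("coffee_table".toList, ["coffee_table".toList, "tea_table".toList]),
    ("lounge_chair".toList, ["lounge_chair".toList, "armchair".toList, "accent_chair".toList]),
    ("dining_table".toList, ["dining_table".toList, "table".toList]),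
    ("dining_chair".toList, ["dining_chair".toList, "chair".toList]),
    ("bed".toList, ["bed".toList, "bedframe".toList]),
    ("cabinet".toList, ["cabinet".toList, "bedside_table".toList, "side_table".toList,
                        "nightstand".toList, "night_table".toList]) ]

-- module constant KNOWN_CATEGORY_SUFFIXES: the distinct alias values sorted by length, longest
-- first (ties between equal-length values are in CPython's set order, which is irrelevant:
-- at most one suffix of a given length can match a given stem — proved below)
def pvSuffixes : List (List Char) :=
  [ "bedside_table".toList, "lounge_chair".toList, "coffee_table".toList, "accent_chair".toList,
    "dining_chair".toList, "dining_table".toList, "night_table".toList, "side_table".toList,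
    "nightstand".toList, "tea_table".toList, "armchair".toList, "bedframe".toList,
    "cabinet".toList, "table".toList, "chair".toList, "couch".toList, "sofa".toList, "bed".toList ]

-- module helper normalize_catalog_type (called by A)
def pvNormalize (type_name : List Char) : List Char :=
  let n := PySem.Chars.lower (PySem.Chars.strip type_name)
  if n.isEmpty then "default".toList
  else
    match pvAliases.find? (fun p => n == p.1 || p.2.contains n) with
    | some p => p.1
    | none => n

-- n.rsplit("_", 1)[-1] : the part of n after the last '_' (A only calls it when '_' ∈ n;
-- hand port, exact there: rsplit with maxsplit 1 cuts at the last separator)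
def pvRsplitLast (cs : List Char) : List Char := (cs.reverse.takeWhile (· != '_')).reverse

def parse_catalog_category_from_stem (stem : String) : String :=
  let n := PySem.Chars.lower (PySem.Chars.strip stem.toList)   -- str(stem or "").strip().lower()
  if n.isEmpty then "default"
  else
    match pvSuffixes.find? (fun s => n == s || PySem.Chars.endswith n ('_' :: s)) with
    | some s => String.ofList (pvNormalize s)
    | none =>
      if PySem.Chars.isIn ['_'] n then String.ofList (pvNormalize (pvRsplitLast n))
      else "default"

-- ===== PORT B =====
-- B's module constant _CANONICAL_BY_ALIAS: one dict alias -> canonical category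
def pvCatalog : PySem.Dict (List Char) (List Char) := PySem.Dict.ofList
  [ ("sofa".toList, "sofa".toList), ("couch".toList, "sofa".toList),
    ("coffee_table".toList, "coffee_table".toList), ("tea_table".toList, "coffee_table".toList),
    ("lounge_chair".toList, "lounge_chair".toList), ("armchair".toList, "lounge_chair".toList),
    ("accent_chair".toList, "lounge_chair".toList),
    ("dining_table".toList, "dining_table".toList), ("table".toList, "dining_table".toList),
    ("dining_chair".toList, "dining_chair".toList), ("chair".toList, "dining_chair".toList),
    ("bed".toList, "bed".toList), ("bedframe".toList, "bed".toList),
    ("cabinet".toList, "cabinet".toList), ("bedside_table".toList, "cabinet".toList),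
    ("side_table".toList, "cabinet".toList), ("nightstand".toList, "cabinet".toList),
    ("night_table".toList, "cabinet".toList) ]

-- the for-loop of Source B: state (has_underscore, last), scanning the remaining characters;
-- at each '_' the tail after it is looked up in the dict (early return = some canonical value)
def pvLoop (hasU : Bool) (last : List Char) : List Char → Bool × List Char × Option (List Char)
  | [] => (hasU, last, none)
  | c :: rest =>
    if c = '_' then
      match pvCatalog.get? rest with
      | some v => (true, rest, some v)
      | none => pvLoop true rest rest
    else pvLoop hasU last rest

def parse_catalog_category_from_stem_alt (stem : String) : String :=
  let n := PySem.Chars.lower (PySem.Chars.strip stem.toList)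
  if n.isEmpty then "default"
  else
    match pvCatalog.get? n with
    | some v => String.ofList v
    | none =>
      match pvLoop false n n with
      | (_, _, some v) => String.ofList v
      | (hasU, last, none) =>
        if !hasU then "default"
        else
          let m := PySem.Chars.strip last
          if m.isEmpty then "default" else String.ofList (pvCatalog.getD m m)

-- ===== PRECONDITION & SPEC =====
def Spec_parse_catalog_category_from_stem (stem : String) (out : String) : Prop := out = parse_catalog_category_from_stem_alt stem
instance (stem : String) (out : String) : Decidable (Spec_parse_catalog_category_from_stem stem out) := by unfold Spec_parse_catalog_category_from_stem; infer_instance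

-- ===== CLAIM (what is proved, stated in full; the proofs are below) =====
def Claim_equal_parse_catalog_category_from_stem : Prop := ∀ (stem : String), Dom_parse_catalog_category_from_stem stem → Spec_parse_catalog_category_from_stem stem (parse_catalog_category_from_stem stem)

-- ===== LEMMAS AND PROOFS =====

-- lowering a character twice is lowering it once
theorem pv_lowerChar_idem (c : Char) : PySem.Chars.lowerChar (PySem.Chars.lowerChar c) = PySem.Chars.lowerChar c := by
  unfold PySem.Chars.lowerChar PySem.Chars.isupper
  split_ifs with h1 h2 <;> try rfl
  exfalso
  simp only [Bool.and_eq_true, decide_eq_true_eq, Char.le_def] at h1 h2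
  have hc65 : 65 ≤ c.val.toNat := by
    have := UInt32.le_iff_toNat_le.mp h1.1
    simpa using this
  have hc90 : c.val.toNat ≤ 90 := by
    have := UInt32.le_iff_toNat_le.mp h1.2
    simpa using this
  have hv : (Char.ofNat (c.toNat + 32)).toNat = c.toNat + 32 := by
    rw [Char.toNat_ofNat, if_pos]
    left
    show c.toNat + 32 < 55296
    have : c.toNat = c.val.toNat := rfl
    omega
  have h2' := UInt32.le_iff_toNat_le.mp h2.2
  have hZ : ('Z'.val).toNat = 90 := by decide
  have he : (Char.ofNat (c.toNat + 32)).val.toNat = (Char.ofNat (c.toNat + 32)).toNat := rfl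
  rw [he, hv, hZ] at h2'
  have : c.toNat = c.val.toNat := rfl
  omega

-- lower is the identity on a list of already-lowered characters
theorem pv_lower_fix (cs : List Char) (h : ∀ c ∈ cs, PySem.Chars.lowerChar c = c) :
    PySem.Chars.lower cs = cs := by
  unfold PySem.Chars.lower
  exact (List.map_congr_left (fun a ha => h a ha)).trans (List.map_id _)

-- every character of lower y is already lowered
theorem pv_mem_lower {c : Char} {y : List Char} (hc : c ∈ PySem.Chars.lower y) :
    PySem.Chars.lowerChar c = c := by
  unfold PySem.Chars.lower at hc
  obtain ⟨d, _, rfl⟩ := List.mem_map.mp hc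
  exact pv_lowerChar_idem d

-- strip keeps only characters of its argument
theorem pv_mem_strip {c : Char} {cs : List Char} (hc : c ∈ PySem.Chars.strip cs) : c ∈ cs := by
  unfold PySem.Chars.strip PySem.Chars.rstrip PySem.Chars.lstrip at hc
  rw [List.mem_reverse] at hc
  have h1 := (List.dropWhile_sublist (l := (List.dropWhile PySem.Chars.isspace cs).reverse) (p := PySem.Chars.isspace)).mem hc
  rw [List.mem_reverse] at h1
  exact (List.dropWhile_sublist (l := cs) (p := PySem.Chars.isspace)).mem h1

-- pvRsplitLast keeps only characters of its argument
theorem pv_mem_rsplit {c : Char} {cs : List Char} (hc : c ∈ pvRsplitLast cs) : c ∈ cs := by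
  unfold pvRsplitLast at hc
  rw [List.mem_reverse] at hc
  have h1 := (List.takeWhile_sublist (l := cs.reverse) (p := (· != '_'))).mem hc
  rw [List.mem_reverse] at h1
  exact h1

-- two suffixes of the same list with equal length are equal
theorem pv_suffix_eq_of_length {l1 l2 n : List Char} (h1 : l1 <:+ n) (h2 : l2 <:+ n)
    (h : l1.length = l2.length) : l1 = l2 := by
  have p1 := List.reverse_prefix.mpr h1
  have p2 := List.reverse_prefix.mpr h2
  have hp := List.prefix_of_prefix_length_le p1 p2 (by simp [h])
  have he := hp.eq_of_length (by simp [h])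
  simpa using congrArg List.reverse he

-- pvSuffixes is sorted by length, longest first
theorem pv_suffixes_sorted : pvSuffixes.Pairwise (fun a b => b.length ≤ a.length) := by decide

-- every key of the dict is a known suffix
theorem pv_keys : ∀ q ∈ pvCatalog.items, q.1 ∈ pvSuffixes := by decide

-- a successful dict lookup means the key is a known suffix
theorem pv_get?_mem {t v : List Char} (h : pvCatalog.get? t = some v) : t ∈ pvSuffixes := by
  unfold PySem.Dict.get? at h
  cases hF : List.find? (fun p => p.1 == t) pvCatalog.items with
  | none => rw [hF] at h; simp at h
  | some q =>
    have hq := List.find?_some hF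
    have hmem := List.mem_of_find?_eq_some hF
    have : q.1 = t := by simpa using hq
    exact this ▸ pv_keys q hmem

-- on a known suffix, the dict returns exactly what normalize_catalog_type returns
theorem pv_mem_get? : ∀ t ∈ pvSuffixes, pvCatalog.get? t = some (pvNormalize t) := by decide

-- on a known suffix, A's alias scan agrees with getD
theorem pv_alias_getD_mem : ∀ m ∈ pvSuffixes,
    (match pvAliases.find? (fun p => m == p.1 || p.2.contains m) with
     | some p => p.1
     | none => m) = pvCatalog.getD m m := by decide

-- every alias string is a known suffix
theorem pv_alias_in_suffixes : ∀ p ∈ pvAliases, p.1 ∈ pvSuffixes ∧ ∀ a ∈ p.2, a ∈ pvSuffixes := by decide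

-- A's alias scan equals a getD lookup, for every string
theorem pv_alias_getD (m : List Char) :
    (match pvAliases.find? (fun p => m == p.1 || p.2.contains m) with
     | some p => p.1
     | none => m) = pvCatalog.getD m m := by
  by_cases hm : m ∈ pvSuffixes
  · exact pv_alias_getD_mem m hm
  · have hF : pvAliases.find? (fun p => m == p.1 || p.2.contains m) = none := by
      cases hF : pvAliases.find? (fun p => m == p.1 || p.2.contains m) with
      | none => rfl
      | some p =>
        exfalso
        have hq := List.find?_some hF
        have hmem := List.mem_of_find?_eq_some hF
        rcases Bool.or_eq_true_iff.mp hq with h1 | h1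
        · have : m = p.1 := by simpa using h1
          exact hm (this ▸ (pv_alias_in_suffixes p hmem).1)
        · have : m ∈ p.2 := by simpa using h1
          exact hm ((pv_alias_in_suffixes p hmem).2 m this)
    have hG : pvCatalog.get? m = none := by
      cases hG : pvCatalog.get? m with
      | none => rfl
      | some v => exact absurd (pv_get?_mem hG) hm
    rw [hF]
    simp [PySem.Dict.getD, hG]

-- A's normalize of a (already lowered) token equals B's strip-then-getD fallback
theorem pv_fallback (cs : List Char) (hfix : ∀ c ∈ cs, PySem.Chars.lowerChar c = c) :
    String.ofList (pvNormalize cs)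
      = (if (PySem.Chars.strip cs).isEmpty then "default"
         else String.ofList (pvCatalog.getD (PySem.Chars.strip cs) (PySem.Chars.strip cs))) := by
  unfold pvNormalize
  have hl : PySem.Chars.lower (PySem.Chars.strip cs) = PySem.Chars.strip cs :=
    pv_lower_fix _ (fun c hc => hfix c (pv_mem_strip hc))
  rw [hl]
  by_cases hE : (PySem.Chars.strip cs).isEmpty
  · simp [hE]
  · simp only [hE, if_neg, Bool.false_eq_true, not_false_iff]
    rw [pv_alias_getD (PySem.Chars.strip cs)]

-- branch equations of pvLoop
theorem pvLoop_cons_hit (hasU : Bool) (last rest v : List Char)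
    (hk : pvCatalog.get? rest = some v) :
    pvLoop hasU last ('_' :: rest) = (true, rest, some v) := by
  simp [pvLoop, hk]

theorem pvLoop_cons_miss (hasU : Bool) (last rest : List Char)
    (hk : pvCatalog.get? rest = none) :
    pvLoop hasU last ('_' :: rest) = pvLoop true rest rest := by
  simp [pvLoop, hk]

theorem pvLoop_cons_ne (hasU : Bool) (last rest : List Char) (c : Char) (hc : ¬ c = '_') :
    pvLoop hasU last (c :: rest) = pvLoop hasU last rest := by simp [pvLoop, hc]

-- a hit of the loop: the looked-up tail is a boundary suffix with that dict value, and the longest such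
theorem pvLoop_some {hasU : Bool} {last cs : List Char} {h' : Bool} {l' v : List Char}
    (h : pvLoop hasU last cs = (h', l', some v)) :
    ∃ t, ('_' :: t) <:+ cs ∧ pvCatalog.get? t = some v ∧
      ∀ u, ('_' :: u) <:+ cs → (pvCatalog.get? u).isSome = true → u.length ≤ t.length := by
  induction cs generalizing hasU last with
  | nil => simp [pvLoop] at h
  | cons c rest ih =>
    by_cases hc : c = '_'
    · subst hc
      cases hk : pvCatalog.get? rest with
      | none =>
        rw [pvLoop_cons_miss _ _ _ hk] at h
        obtain ⟨t, hs, hct, hmax⟩ := ih h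
        refine ⟨t, hs.trans (List.suffix_cons _ _), hct, ?_⟩
        intro u hu hcu
        rcases List.suffix_cons_iff.mp hu with h1 | h1
        · have : u = rest := by simpa using h1
          subst this; rw [hk] at hcu; simp at hcu
        · exact hmax u h1 hcu
      | some w =>
        rw [pvLoop_cons_hit _ _ _ _ hk] at h
        have hv : w = v := by
          have := congrArg (fun p => p.2.2) h; simpa using this
        subst hv
        refine ⟨rest, List.suffix_refl _, hk, ?_⟩
        intro u hu _
        rcases List.suffix_cons_iff.mp hu with h1 | h1
        · exact le_of_eq (by simpa using congrArg List.length h1)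
        · have := h1.length_le; simp at this; omega
    · rw [pvLoop_cons_ne _ _ _ _ hc] at h
      obtain ⟨t, hs, hct, hmax⟩ := ih h
      refine ⟨t, hs.trans (List.suffix_cons _ _), hct, ?_⟩
      intro u hu hcu
      rcases List.suffix_cons_iff.mp hu with h1 | h1
      · exact absurd (List.cons.injEq _ _ _ _ ▸ h1).1.symm hc
      · exact hmax u h1 hcu

-- a miss of the loop: no boundary tail of cs is in the dict
theorem pvLoop_none {hasU : Bool} {last cs : List Char} {h' : Bool} {l' : List Char}
    (h : pvLoop hasU last cs = (h', l', none)) :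
    ∀ u, ('_' :: u) <:+ cs → pvCatalog.get? u = none := by
  induction cs generalizing hasU last with
  | nil => intro u hu; have := hu.length_le; simp at this
  | cons c rest ih =>
    intro u hu
    by_cases hc : c = '_'
    · subst hc
      cases hk : pvCatalog.get? rest with
      | none =>
        rw [pvLoop_cons_miss _ _ _ hk] at h
        rcases List.suffix_cons_iff.mp hu with h1 | h1
        · have : u = rest := by simpa using h1
          subst this; exact hk
        · exact ih h u h1
      | some w =>
        rw [pvLoop_cons_hit _ _ _ _ hk] at h
        exact absurd (congrArg (fun p => p.2.2) h) (by simp)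
    · rw [pvLoop_cons_ne _ _ _ _ hc] at h
      rcases List.suffix_cons_iff.mp hu with h1 | h1
      · exact absurd (List.cons.injEq _ _ _ _ ▸ h1).1.symm hc
      · exact ih h u h1

-- takeWhile facts used for pvRsplitLast
theorem pv_takeWhile_len (p : Char → Bool) (xs : List Char) :
    ((xs.takeWhile p).length = xs.length) ↔ ∀ a ∈ xs, p a := by
  constructor
  · intro h a ha
    have he := (List.takeWhile_prefix p (l := xs)).eq_of_length h
    exact List.mem_takeWhile_imp (he ▸ ha)
  · intro h; rw [List.takeWhile_eq_self_iff.mpr h]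

theorem pv_cond (rest : List Char) :
    ((rest.reverse.takeWhile (· != '_')).length = rest.reverse.length) ↔ '_' ∉ rest := by
  rw [pv_takeWhile_len]
  constructor
  · intro h hm
    have := h '_' (by simpa using hm)
    simp at this
  · intro h a ha
    simp only [bne_iff_ne, ne_eq]
    intro he
    exact h (he ▸ (by simpa using ha))

theorem pvRsplitLast_cons (c : Char) (rest : List Char) (hc : c = '_') :
    pvRsplitLast (c :: rest) = (if rest.contains '_' then pvRsplitLast rest else rest) := by
  subst hc
  show (List.takeWhile (· != '_') (('_' :: rest).reverse)).reverse = _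
  rw [List.reverse_cons, List.takeWhile_append]
  by_cases hr : '_' ∈ rest
  · have hcond : ¬ ((rest.reverse.takeWhile (· != '_')).length = rest.reverse.length) := by
      rw [pv_cond]; simpa using hr
    rw [if_neg hcond, if_pos (by simpa [List.contains_iff_mem] using hr)]
    rfl
  · have hcond := (pv_cond rest).mpr hr
    rw [if_pos hcond, if_neg (by simpa [List.contains_iff_mem] using hr)]
    simp

theorem pvRsplitLast_cons_ne (c : Char) (rest : List Char) (_hc : ¬ c = '_')
    (hr : rest.contains '_' = true) : pvRsplitLast (c :: rest) = pvRsplitLast rest := by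
  show (List.takeWhile (· != '_') ((c :: rest).reverse)).reverse = _
  rw [List.reverse_cons, List.takeWhile_append]
  have hcond : ¬ ((rest.reverse.takeWhile (· != '_')).length = rest.reverse.length) := by
    rw [pv_cond]; simpa [List.contains_iff_mem] using hr
  rw [if_neg hcond]
  rfl

-- a miss of the loop: the final state
theorem pvLoop_state {hasU : Bool} {last cs : List Char} {h' : Bool} {l' : List Char}
    (h : pvLoop hasU last cs = (h', l', none)) :
    h' = (hasU || decide ('_' ∈ cs)) ∧ l' = (if '_' ∈ cs then pvRsplitLast cs else last) := by
  induction cs generalizing hasU last with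
  | nil =>
    have e1 := congrArg (fun p => p.1) h
    have e2 := congrArg (fun p => p.2.1) h
    simp only [pvLoop] at e1 e2
    simp [← e1, ← e2]
  | cons c rest ih =>
    by_cases hc : c = '_'
    · subst hc
      cases hk : pvCatalog.get? rest with
      | none =>
        rw [pvLoop_cons_miss _ _ _ hk] at h
        obtain ⟨e1, e2⟩ := ih h
        refine ⟨by simp [e1], ?_⟩
        rw [e2, if_pos (by simp : '_' ∈ ('_' :: rest)), pvRsplitLast_cons '_' rest rfl]
        by_cases hr : '_' ∈ rest
        · rw [if_pos hr, if_pos (List.contains_iff_mem.mpr hr)]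
        · rw [if_neg hr, if_neg (by simpa [List.contains_iff_mem] using hr)]
      | some w =>
        rw [pvLoop_cons_hit _ _ _ _ hk] at h
        exact absurd (congrArg (fun p => p.2.2) h) (by simp)
    · rw [pvLoop_cons_ne _ _ _ _ hc] at h
      obtain ⟨e1, e2⟩ := ih h
      have hne : ¬ ('_' = c) := fun he => hc he.symm
      refine ⟨by simp [e1, hne], ?_⟩
      rw [e2]
      by_cases hr : '_' ∈ rest
      · rw [if_pos hr, if_pos (by simp [hr]),
          pvRsplitLast_cons_ne c rest hc (List.contains_iff_mem.mpr hr)]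
      · rw [if_neg hr, if_neg (by simp [hne, hr])]

-- the central equality, on the normalized stem n
theorem pv_main (n : List Char) (hfix : ∀ c ∈ n, PySem.Chars.lowerChar c = c) :
    (if n.isEmpty then "default"
     else
       match pvSuffixes.find? (fun s => n == s || PySem.Chars.endswith n ('_' :: s)) with
       | some s => String.ofList (pvNormalize s)
       | none =>
         if PySem.Chars.isIn ['_'] n then String.ofList (pvNormalize (pvRsplitLast n))
         else "default")
  = (if n.isEmpty then "default"
     else
       match pvCatalog.get? n with
       | some v => String.ofList v
       | none =>
         match pvLoop false n n with
         | (_, _, some v) => String.ofList v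
         | (hasU, last, none) =>
           if !hasU then "default"
           else
             let m := PySem.Chars.strip last
             if m.isEmpty then "default" else String.ofList (pvCatalog.getD m m)) := by
  by_cases hE : n.isEmpty
  · simp [hE]
  · simp only [hE, if_neg, Bool.false_eq_true, not_false_iff]
    set P : List Char → Bool := fun s => n == s || PySem.Chars.endswith n ('_' :: s) with hP
    cases hG : pvCatalog.get? n with
    | some v =>
      -- the whole stem is a known suffix: A's scan also picks it (it is the longest candidate)
      have hnmem : n ∈ pvSuffixes := pv_get?_mem hG
      have hfind : pvSuffixes.find? P = some n := by
        cases hF : pvSuffixes.find? P with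
        | none =>
          have := List.find?_eq_none.mp hF n hnmem
          rw [hP] at this; simp at this
        | some s =>
          obtain ⟨hPs, as, bs, hsplit, hbefore⟩ := List.find?_eq_some_iff_append.mp hF
          by_cases hs : s = n
          · rw [hs]
          · have hend : ('_' :: s) <:+ n := by
              rcases Bool.or_eq_true_iff.mp (hP ▸ hPs) with h1 | h1
              · have hns : n = s := by simpa using h1
                exact absurd hns.symm hs
              · exact (PySem.Chars.endswith_iff _ _).mp h1
            have hlt : s.length < n.length := by
              have := hend.length_le; simp at this; omega
            rw [hsplit] at hnmem
            rcases List.mem_append.mp hnmem with h1 | h1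
            · have hf : P n = false := by simpa using hbefore n h1
              have hPn : P n = true := by rw [hP]; simp
              rw [hPn] at hf; exact absurd hf (by simp)
            · rcases List.mem_cons.mp h1 with h1 | h1
              · exact absurd h1.symm hs
              · have hsorted := pv_suffixes_sorted
                rw [hsplit] at hsorted
                have := (List.pairwise_cons.mp (List.pairwise_append.mp hsorted).2.1).1 n h1
                omega
      have hv : v = pvNormalize n := by
        have := pv_mem_get? n hnmem
        rw [hG] at this
        exact Option.some.inj this
      simp [hfind, hv]
    | none =>
      -- the whole stem is not known: compare A's scan with B's loop
      have hKm : n ∉ pvSuffixes := fun hm => by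
        rw [pv_mem_get? n hm] at hG; simp at hG
      rcases hL : pvLoop false n n with ⟨h', l', r⟩
      cases r with
      | some v =>
        obtain ⟨t, hsuf, hgt, hmax⟩ := pvLoop_some hL
        have htmem : t ∈ pvSuffixes := pv_get?_mem hgt
        have hPt : P t = true := by
          rw [hP]
          exact Bool.or_eq_true_iff.mpr (Or.inr ((PySem.Chars.endswith_iff _ _).mpr hsuf))
        have hfind : pvSuffixes.find? P = some t := by
          cases hF : pvSuffixes.find? P with
          | none =>
            have := List.find?_eq_none.mp hF t htmem
            exact absurd hPt this
          | some s =>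
            obtain ⟨hPs, as, bs, hsplit, hbefore⟩ := List.find?_eq_some_iff_append.mp hF
            by_cases hs : s = t
            · rw [hs]
            · have hsmem : s ∈ pvSuffixes := by rw [hsplit]; simp
              have hendS : ('_' :: s) <:+ n := by
                rcases Bool.or_eq_true_iff.mp (hP ▸ hPs) with h1 | h1
                · have hns : n = s := by simpa using h1
                  exact absurd (hns ▸ hsmem) hKm
                · exact (PySem.Chars.endswith_iff _ _).mp h1
              have hle : s.length ≤ t.length :=
                hmax s hendS (by rw [pv_mem_get? s hsmem]; rfl)
              rw [hsplit] at htmem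
              rcases List.mem_append.mp htmem with h1 | h1
              · have hf : P t = false := by simpa using hbefore t h1
                rw [hPt] at hf; exact absurd hf (by simp)
              · rcases List.mem_cons.mp h1 with h1 | h1
                · exact absurd h1.symm hs
                · have hsorted := pv_suffixes_sorted
                  rw [hsplit] at hsorted
                  have hge := (List.pairwise_cons.mp (List.pairwise_append.mp hsorted).2.1).1 t h1
                  have : ('_' :: s) = ('_' :: t) :=
                    pv_suffix_eq_of_length hendS hsuf (by simp; omega)
                  exact absurd (by simpa using this) hs
        have hv : v = pvNormalize t := by
          have := pv_mem_get? t htmem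
          rw [hgt] at this
          exact Option.some.inj this
        simp [hfind, hv]
      | none =>
        have hnone := pvLoop_none hL
        have hfind : pvSuffixes.find? P = none := by
          apply List.find?_eq_none.mpr
          intro s hsmem
          rw [hP]
          simp only [Bool.or_eq_true_iff, not_or]
          constructor
          · intro h1
            have hns : n = s := by simpa using h1
            exact absurd (hns ▸ hsmem) hKm
          · intro h1
            have := hnone s ((PySem.Chars.endswith_iff _ _).mp h1)
            rw [pv_mem_get? s hsmem] at this
            exact absurd this (by simp)
        obtain ⟨e1, e2⟩ := pvLoop_state hL
        have hin : PySem.Chars.isIn ['_'] n = true ↔ '_' ∈ n := by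
          rw [PySem.Chars.isIn_iff_infix, List.singleton_infix_iff]
        by_cases hU : '_' ∈ n
        · have hIn : PySem.Chars.isIn ['_'] n = true := hin.mpr hU
          have hfall := pv_fallback (pvRsplitLast n)
            (fun c hc => hfix c (pv_mem_rsplit hc))
          simp only [hfind, hIn, hU, e1, e2, if_pos, Bool.false_or,
            decide_true, Bool.not_true, Bool.false_eq_true, if_false]
          rw [hfall]
        · have hIn : PySem.Chars.isIn ['_'] n = false := by
            cases hi : PySem.Chars.isIn ['_'] n with
            | false => rfl
            | true => exact absurd (hin.mp hi) hU
          simp [hfind, hIn, hU, e1]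

-- ===== VERDICT (by name: the statement is the Claim_ definition above) =====
theorem parse_catalog_category_from_stem_spec : Claim_equal_parse_catalog_category_from_stem := by
  intro stem _
  unfold Spec_parse_catalog_category_from_stem
  unfold parse_catalog_category_from_stem parse_catalog_category_from_stem_alt
  simp only []
  exact pv_main (PySem.Chars.lower (PySem.Chars.strip stem.toList))
    (fun c hc => pv_mem_lower hc)
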